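-- pv_equiv track=rewrite | github.com/bobbycyiii/coover | min_aut.py | freely_reduce
-- ===== SOURCE A (Python) =====
-- def freely_reduce(w):
--     reduction_occured = True
--     while reduction_occured :
--         reduction_occured = False
--         for i in range(len(w) - 1) :
--             if w[i] == w[i+1].swapcase() :
--                 reduction_occured = True
--                 w = w[:i] + w[i+2:]
--                 break
--     return w
-- ===== SOURCE B (Python) =====
-- def freely_reduce(w):
--     stack = []
--     for c in w:
--         if stack and stack[-1] == c.swapcase():
--             stack.pop()
--         else:
--             stack.append(c)
--     return ''.join(stack)
-- ===== Notes on version B (the rewrite author's own statement) =====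
-- stated objective: alternative
-- what changed: Replaced the repeated rescan-and-splice loop (find first cancelling pair, rebuild the string, restart the scan) by a single left-to-right pass with a stack that pops on cancellation.
import Mathlib
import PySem

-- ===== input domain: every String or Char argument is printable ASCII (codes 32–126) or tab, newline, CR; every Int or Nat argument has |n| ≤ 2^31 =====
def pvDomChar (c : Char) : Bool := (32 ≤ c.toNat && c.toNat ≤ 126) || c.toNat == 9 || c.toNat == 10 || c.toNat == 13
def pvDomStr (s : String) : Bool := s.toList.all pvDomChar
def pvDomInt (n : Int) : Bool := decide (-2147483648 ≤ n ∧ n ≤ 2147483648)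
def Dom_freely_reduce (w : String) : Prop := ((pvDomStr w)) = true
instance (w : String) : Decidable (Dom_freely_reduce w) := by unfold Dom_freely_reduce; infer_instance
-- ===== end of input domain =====

-- B replaces A's repeated rescan-and-splice reduction loop by a single
-- left-to-right stack pass (pop on cancellation); equivalence is proved for all strings.


-- Python str.swapcase for a single character; exact on the ASCII domain (Dom), where
-- swapcase only exchanges 'a'-'z' with 'A'-'Z'.
def pvSwap (c : Char) : Char :=
  let n := c.toNat
  if 97 ≤ n ∧ n ≤ 122 then Char.ofNat (n - 32)
  else if 65 ≤ n ∧ n ≤ 90 then Char.ofNat (n + 32)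
  else c

-- ===== PORT A =====
-- the inner `for i in range(len(w)-1): if w[i] == w[i+1].swapcase(): w = w[:i]+w[i+2:]; break`
-- scan: returns the word with the FIRST cancelling adjacent pair removed, or none.
def scanA : List Char → Option (List Char)
  | [] => none
  | [_] => none
  | a :: b :: rest =>
    if a = pvSwap b then some rest
    else (scanA (b :: rest)).map (a :: ·)

theorem scanA_length : ∀ {l l' : List Char}, scanA l = some l' → l'.length + 2 = l.length
  | [], _, h => by simp [scanA] at h
  | [_], _, h => by simp [scanA] at h
  | a :: b :: rest, l', h => by
    by_cases hc : a = pvSwap b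
    · simp [scanA, hc] at h; simp [← h]
    · simp [scanA, hc] at h
      obtain ⟨m, hm, rfl⟩ := h
      have := scanA_length hm
      simp only [List.length_cons] at this ⊢
      omega

-- the outer `while reduction_occured` loop
def loopA (l : List Char) : List Char :=
  match h : scanA l with
  | none => l
  | some l' => loopA l'
termination_by l.length
decreasing_by have := scanA_length h; omega

def freely_reduce (w : String) : String := String.ofList (loopA w.toList)

-- ===== PORT B =====
-- one stack step: pop if the top cancels the incoming character, else push
def stepB (s : List Char) (c : Char) : List Char :=
  match s with
  | t :: s' => if t = pvSwap c then s' else c :: t :: s'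
  | [] => [c]

def freely_reduce_alt (w : String) : String :=
  String.ofList ((w.toList.foldl stepB []).reverse)

-- ===== PRECONDITION & SPEC =====
def Spec_freely_reduce (w : String) (out : String) : Prop := out = freely_reduce_alt w
instance (w : String) (out : String) : Decidable (Spec_freely_reduce w out) := by unfold Spec_freely_reduce; infer_instance

-- ===== CLAIM (what is proved, stated in full; the proofs are below) =====
def Claim_equal_freely_reduce : Prop := ∀ (w : String), Dom_freely_reduce w → Spec_freely_reduce w (freely_reduce w)

-- ===== LEMMAS AND PROOFS =====

theorem pvSwap_swap (c : Char) : pvSwap (pvSwap c) = c := by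
  have hup : ∀ n : Nat, n < 55296 → (Char.ofNat n).toNat = n := by
    intro n h
    have hv : Nat.isValidChar n := Or.inl h
    rw [Char.ofNat, dif_pos hv]
    simp [Char.toNat, Char.ofNatAux]
  have hc : c.toNat < 1114112 := by
    rcases c.valid with h | ⟨h1, h2⟩ <;>
    · unfold Char.toNat UInt32.toNat at *
      omega
  unfold pvSwap
  by_cases h1 : 97 ≤ c.toNat ∧ c.toNat ≤ 122
  · rw [if_pos h1]
    have h2 : (Char.ofNat (c.toNat - 32)).toNat = c.toNat - 32 := hup _ (by omega)
    rw [if_neg (by omega), if_pos (by omega), h2]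
    have : c.toNat - 32 + 32 = c.toNat := by omega
    rw [this]
    exact Char.ofNat_toNat c
  · rw [if_neg h1]
    by_cases h2 : 65 ≤ c.toNat ∧ c.toNat ≤ 90
    · rw [if_pos h2]
      have h3 : (Char.ofNat (c.toNat + 32)).toNat = c.toNat + 32 := hup _ (by omega)
      rw [if_pos (by omega), h3]
      have : c.toNat + 32 - 32 = c.toNat := by omega
      rw [this]
      exact Char.ofNat_toNat c
    · rw [if_neg h2, if_neg h1, if_neg h2]

-- "no cancelling adjacent pair", in word order
def Red (l : List Char) : Prop := List.IsChain (fun x y => x ≠ pvSwap y) l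

-- the stack, read top-first, is the reverse of a reduced word
def GoodS (s : List Char) : Prop := List.IsChain (fun t u => u ≠ pvSwap t) s

theorem scanA_none : ∀ {l : List Char}, scanA l = none → Red l
  | [], _ => List.isChain_nil
  | [_], _ => List.isChain_singleton _
  | a :: b :: rest, h => by
    by_cases hc : a = pvSwap b
    · simp [scanA, hc] at h
    · simp [scanA, hc] at h
      exact List.isChain_cons_cons.mpr ⟨hc, scanA_none h⟩

theorem scanA_some : ∀ {l l' : List Char}, scanA l = some l' →
    ∃ u a b v, l = u ++ a :: b :: v ∧ a = pvSwap b ∧ l' = u ++ v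
  | [], _, h => by simp [scanA] at h
  | [_], _, h => by simp [scanA] at h
  | a :: b :: rest, l', h => by
    by_cases hc : a = pvSwap b
    · simp [scanA, hc] at h
      exact ⟨[], a, b, rest, by simp, hc, by simp [← h]⟩
    · simp [scanA, hc] at h
      obtain ⟨m, hm, rfl⟩ := h
      obtain ⟨u, x, y, v, h1, h2, h3⟩ := scanA_some hm
      exact ⟨a :: u, x, y, v, by simp [h1], h2, by simp [h3]⟩

theorem stepB_good {s : List Char} (hs : GoodS s) (c : Char) : GoodS (stepB s c) := by
  cases s with
  | nil => exact List.isChain_singleton _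
  | cons t s' =>
    by_cases h : t = pvSwap c
    · simp only [stepB, if_pos h]
      exact (List.isChain_cons.mp hs).2
    · simp only [stepB, if_neg h]
      exact List.isChain_cons_cons.mpr ⟨h, hs⟩

theorem stepB_cancel {s : List Char} (hs : GoodS s) {a b : Char} (hab : a = pvSwap b) :
    stepB (stepB s a) b = s := by
  cases s with
  | nil => simp [stepB, hab]
  | cons t s' =>
    by_cases ht : t = pvSwap a
    · have htb : t = b := by rw [ht, hab, pvSwap_swap]
      rw [show stepB (t :: s') a = s' from by simp [stepB, ht]]
      cases s' with
      | nil => simp [stepB, htb]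
      | cons u s'' =>
        have hu : u ≠ pvSwap t := (List.isChain_cons_cons.mp hs).1
        rw [htb] at hu
        simp [stepB, hu, htb]
    · rw [show stepB (t :: s') a = a :: t :: s' from by simp [stepB, ht]]
      simp [stepB, hab]

theorem foldl_good {s : List Char} (hs : GoodS s) (l : List Char) : GoodS (l.foldl stepB s) := by
  induction l generalizing s with
  | nil => exact hs
  | cons c l ih => exact ih (stepB_good hs c)

theorem foldl_cancel {s : List Char} (hs : GoodS s) (u : List Char) {a b : Char}
    (hab : a = pvSwap b) (v : List Char) :
    (u ++ a :: b :: v).foldl stepB s = (u ++ v).foldl stepB s := by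
  rw [List.foldl_append, List.foldl_append]
  simp only [List.foldl_cons]
  rw [stepB_cancel (foldl_good hs u) hab]

theorem foldl_of_red : ∀ (l : List Char) (s : List Char), Red (s.reverse ++ l) →
    l.foldl stepB s = l.reverse ++ s := by
  intro l
  induction l with
  | nil => intro s _; simp
  | cons c l ih =>
    intro s hr
    have hnc : ∀ t ∈ s.head?, t ≠ pvSwap c := by
      intro t ht
      rcases (List.isChain_append.mp hr) with ⟨_, _, h3⟩
      exact h3 t (by simpa using ht) c (by simp)
    have hstep : stepB s c = c :: s := by
      cases s with
      | nil => rfl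
      | cons t s' => simp [stepB, hnc t (by simp)]
    rw [List.foldl_cons, hstep, ih (c :: s) (by simpa using hr)]
    simp

theorem loopA_eq : ∀ (l : List Char), loopA l = (l.foldl stepB []).reverse := by
  intro l
  induction l using loopA.induct with
  | case1 l h =>
    rw [loopA.eq_def]
    split
    · rw [foldl_of_red l [] (by simpa using scanA_none h)]
      simp
    · next l'' heq => simp [h] at heq
  | case2 l l' h ih =>
    rw [loopA.eq_def]
    split
    · next heq => simp [h] at heq
    · next l'' heq =>
      have he : l'' = l' := by rw [h] at heq; exact (Option.some.inj heq).symm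
      subst he
      obtain ⟨u, a, b, v, h1, h2, h3⟩ := scanA_some h
      rw [ih, h1, h3, foldl_cancel List.isChain_nil u h2 v]

-- ===== VERDICT (by name: the statement is the Claim_ definition above) =====
theorem freely_reduce_spec : Claim_equal_freely_reduce := by
  intro w _
  unfold Spec_freely_reduce freely_reduce freely_reduce_alt
  rw [loopA_eq]
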